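-- pv_equiv track=rewrite | github.com/MillarayMunozPenroz/Criptografia | read.py | find_best_decryption
-- ===== SOURCE A (Python) =====
-- def caesar_decrypt(text, shift):
--     decrypted_text = ''
--     for char in text:
--         if char.isalpha():
--             shifted = ord(char) - shift
--             if char.isupper():
--                 if shifted < ord('A'):
--                     shifted += 26
--             else:
--                 if shifted < ord('a'):
--                     shifted += 26
--             decrypted_text += chr(shifted)
--         else:
--             decrypted_text += char
--     return decrypted_text
--
-- def find_best_decryption(encrypted_text):
--     best_decryption = ''
--     best_score = 0
--     for shift in range(26):
--         decryption = caesar_decrypt(encrypted_text, shift)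
--         # Puedes usar alguna biblioteca de procesamiento de lenguaje natural aquí para mejorar la detección
--         # En este ejemplo, simplemente comparamos con un diccionario de palabras en español
--         spanish_words = set(["el", "la", "los", "las", "un", "una", "de", "en", "y", "a", "para", "por"])
--         words = decryption.split()
--         common_words = sum(1 for word in words if word in spanish_words)
--         if common_words > best_score:
--             best_score = common_words
--             best_decryption = decryption
--     return best_decryption
-- ===== SOURCE B (Python) =====
-- SPANISH_WORDS = ["el", "la", "los", "las", "un", "una", "de", "en", "y", "a", "para", "por"]
--
--
-- def _decrypt(text, shift):
--     return ''.join(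
--         chr((ord(c) - 65 - shift) % 26 + 65) if 'A' <= c <= 'Z'
--         else chr((ord(c) - 97 - shift) % 26 + 97) if 'a' <= c <= 'z'
--         else c
--         for c in text)
--
--
-- def find_best_decryption(encrypted_text):
--     # One pass over the tokens: each token votes for the (unique) shift that
--     # would turn it into each same-length Spanish word; then decrypt once.
--     counts = [0] * 26
--     for token in encrypted_text.split():
--         if all('a' <= ch <= 'z' for ch in token):
--             for word in SPANISH_WORDS:
--                 if len(word) == len(token):
--                     s = (ord(token[0]) - ord(word[0])) % 26
--                     if all((ord(a) - ord(b)) % 26 == s for a, b in zip(token, word)):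
--                         counts[s] += 1
--     best = max(counts)
--     if best == 0:
--         return ''
--     return _decrypt(encrypted_text, counts.index(best))
-- ===== Notes on version B (the rewrite author's own statement) =====
-- stated objective: faster
-- what changed: A decrypts the whole text 26 times and scores each candidate against the word set; B makes a single pass over the tokens in which each token votes for the unique shift that maps it onto each same-length Spanish word, then decrypts once at the winning (lowest, strictly positive) shift.
import Mathlib
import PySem

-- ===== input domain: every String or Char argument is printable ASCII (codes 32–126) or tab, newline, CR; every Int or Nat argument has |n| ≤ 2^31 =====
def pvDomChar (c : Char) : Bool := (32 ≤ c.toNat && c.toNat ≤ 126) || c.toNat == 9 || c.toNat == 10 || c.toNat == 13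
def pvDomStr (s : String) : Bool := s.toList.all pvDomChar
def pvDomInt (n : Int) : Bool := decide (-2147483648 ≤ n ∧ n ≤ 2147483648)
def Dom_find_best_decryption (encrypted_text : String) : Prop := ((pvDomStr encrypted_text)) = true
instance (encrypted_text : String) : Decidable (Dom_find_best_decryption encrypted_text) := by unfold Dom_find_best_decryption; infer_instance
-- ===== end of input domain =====

-- B replaces A's 26 decrypt-and-score passes over the whole text by a single voting pass
-- over the tokens (each token votes for the unique shift mapping it onto each same-length
-- Spanish word), then decrypts once at the winning shift; objective: faster by mechanism.

-- ===== PORT A =====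

def pvDecChar (shift : Int) (c : Char) : Char :=
  if PySem.Chars.isalpha c then
    let s1 : Int := (c.toNat : Int) - shift
    let s2 : Int :=
      if PySem.Chars.isupper c then (if s1 < 65 then s1 + 26 else s1)
      else (if s1 < 97 then s1 + 26 else s1)
    Char.ofNat s2.toNat
  else c

def caesar_decrypt (text : String) (shift : Int) : String :=
  String.ofList (text.toList.foldl (fun acc c => acc ++ [pvDecChar shift c]) [])

def pvSpanishWords : PySem.Set String :=
  PySem.Set.ofList ["el", "la", "los", "las", "un", "una", "de", "en", "y", "a", "para", "por"]

-- loop body of B's inner 'for word in SPANISH_WORDS' loop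

def find_best_decryption (encrypted_text : String) : String :=
  ((PySem.List.pyRange 0 26 1).foldl (fun (st : String × Int) shift =>
    let decryption := caesar_decrypt encrypted_text shift
    let words := PySem.Str.split₀ decryption
    let common_words : Int := words.foldl (fun n w => if pvSpanishWords.contains w then n + 1 else n) 0
    if st.2 < common_words then (decryption, common_words) else st) ("", 0)).1


-- ===== PORT B =====

def pvAltWords : List String := ["el", "la", "los", "las", "un", "una", "de", "en", "y", "a", "para", "por"]

def pvAltDecChar (shift : Int) (c : Char) : Char :=
  if 'A' ≤ c ∧ c ≤ 'Z' then Char.ofNat (PySem.Int.mod ((c.toNat : Int) - 65 - shift) 26 + 65).toNat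
  else if 'a' ≤ c ∧ c ≤ 'z' then Char.ofNat (PySem.Int.mod ((c.toNat : Int) - 97 - shift) 26 + 97).toNat
  else c

def pvAltDecrypt (text : String) (shift : Int) : String :=
  String.ofList (text.toList.map (pvAltDecChar shift))

def pvWordStep (t : List Char) (cnts : List Int) (w : String) : List Int :=
  let wl := w.toList
  if wl.length = t.length then
    let s := PySem.Int.mod ((t.headI.toNat : Int) - (wl.headI.toNat : Int)) 26
    if (t.zip wl).all (fun p => PySem.Int.mod ((p.1.toNat : Int) - (p.2.toNat : Int)) 26 == s) then
      cnts.set s.toNat (cnts.getD s.toNat 0 + 1)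
    else cnts
  else cnts

def pvVoteToken (counts : List Int) (t : List Char) : List Int :=
  if t.all (fun c => decide ('a' ≤ c) && decide (c ≤ 'z')) then
    pvAltWords.foldl (pvWordStep t) counts
  else counts

def find_best_decryption_alt (encrypted_text : String) : String :=
  let counts := (PySem.Str.split₀ encrypted_text).foldl (fun cs w => pvVoteToken cs w.toList) (List.replicate 26 0)
  let best := (PySem.List.max? counts (fun x => x)).getD 0
  if best = 0 then ""
  else pvAltDecrypt encrypted_text (((PySem.List.index? counts best).getD 0 : Nat) : Int)


-- ===== PRECONDITION & SPEC =====
def Spec_find_best_decryption (encrypted_text : String) (out : String) : Prop := out = find_best_decryption_alt encrypted_text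
instance (encrypted_text : String) (out : String) : Decidable (Spec_find_best_decryption encrypted_text out) := by unfold Spec_find_best_decryption; infer_instance

-- ===== CLAIM (what is proved, stated in full; the proofs are below) =====
def Claim_equal_find_best_decryption : Prop := ∀ (encrypted_text : String), Dom_find_best_decryption encrypted_text → Spec_find_best_decryption encrypted_text (find_best_decryption encrypted_text)

-- ===== LEMMAS AND PROOFS =====

theorem pv_le_char (c d : Char) : (c ≤ d) ↔ c.toNat ≤ d.toNat := ⟨fun h => h, fun h => h⟩

theorem pv_char_eq_iff (c d : Char) : c = d ↔ c.toNat = d.toNat := by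
  constructor
  · intro h; rw [h]
  · intro h; exact Char.ext (by exact UInt32.toNat_inj.mp h)

theorem pv_isupper_iff (c : Char) : PySem.Chars.isupper c = true ↔ 65 ≤ c.toNat ∧ c.toNat ≤ 90 := by
  simp [PySem.Chars.isupper, pv_le_char]

theorem pv_islower_iff (c : Char) : PySem.Chars.islower c = true ↔ 97 ≤ c.toNat ∧ c.toNat ≤ 122 := by
  simp [PySem.Chars.islower, pv_le_char]

theorem pv_isalpha_iff (c : Char) : PySem.Chars.isalpha c = true ↔
    (65 ≤ c.toNat ∧ c.toNat ≤ 90) ∨ (97 ≤ c.toNat ∧ c.toNat ≤ 122) := by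
  simp [PySem.Chars.isalpha]; rw [pv_isupper_iff, pv_islower_iff]

theorem pv_mod26 (a : Int) : PySem.Int.mod a 26 = a % 26 := by
  rw [PySem.Int.mod, Int.fmod_eq_emod]; simp

theorem pv_toNat_ofNat (n : Nat) (h : n < 55296) : (Char.ofNat n).toNat = n := by
  unfold Char.ofNat; split
  · rfl
  · rename_i hv; exact absurd (Or.inl (by omega : n < 0xd800)) hv

theorem pv_decChar_upper (s : Int) (c : Char) (hc : 65 ≤ c.toNat ∧ c.toNat ≤ 90)
    (h0 : 0 ≤ s) (h1 : s < 26) :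
    ((pvDecChar s c).toNat : Int) = ((c.toNat : Int) - 65 - s) % 26 + 65 := by
  have halpha : PySem.Chars.isalpha c = true := (pv_isalpha_iff c).mpr (Or.inl hc)
  have hup : PySem.Chars.isupper c = true := (pv_isupper_iff c).mpr hc
  simp only [pvDecChar, halpha, hup, if_true]
  set v : Int := if (c.toNat : Int) - s < 65 then (c.toNat : Int) - s + 26 else (c.toNat : Int) - s with hv
  have hvb : 65 ≤ v ∧ v ≤ 90 := by rw [hv]; split <;> omega
  rw [pv_toNat_ofNat v.toNat (by omega)]
  omega

theorem pv_decChar_lower (s : Int) (c : Char) (hc : 97 ≤ c.toNat ∧ c.toNat ≤ 122)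
    (h0 : 0 ≤ s) (h1 : s < 26) :
    ((pvDecChar s c).toNat : Int) = ((c.toNat : Int) - 97 - s) % 26 + 97 := by
  have halpha : PySem.Chars.isalpha c = true := (pv_isalpha_iff c).mpr (Or.inr hc)
  have hup : PySem.Chars.isupper c = false := by
    rw [← Bool.not_eq_true]; intro h; have := (pv_isupper_iff c).mp h; omega
  simp only [pvDecChar, halpha, hup, if_true, if_false, Bool.false_eq_true]
  set v : Int := if (c.toNat : Int) - s < 97 then (c.toNat : Int) - s + 26 else (c.toNat : Int) - s with hv
  have hvb : 97 ≤ v ∧ v ≤ 122 := by rw [hv]; split <;> omega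
  rw [pv_toNat_ofNat v.toNat (by omega)]
  omega

theorem pv_decChar_nonalpha (s : Int) (c : Char) (h : ¬ PySem.Chars.isalpha c = true) :
    pvDecChar s c = c := by
  simp [pvDecChar, h]

theorem pv_isspace_false (c : Char) (h : 65 ≤ c.toNat ∧ c.toNat ≤ 122) :
    PySem.Chars.isspace c = false := by
  simp [PySem.Chars.isspace]; omega

theorem pv_decChar_bounds_upper (s : Int) (c : Char) (hc : 65 ≤ c.toNat ∧ c.toNat ≤ 90)
    (h0 : 0 ≤ s) (h1 : s < 26) : 65 ≤ (pvDecChar s c).toNat ∧ (pvDecChar s c).toNat ≤ 90 := by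
  have := pv_decChar_upper s c hc h0 h1
  omega

theorem pv_decChar_bounds_lower (s : Int) (c : Char) (hc : 97 ≤ c.toNat ∧ c.toNat ≤ 122)
    (h0 : 0 ≤ s) (h1 : s < 26) : 97 ≤ (pvDecChar s c).toNat ∧ (pvDecChar s c).toNat ≤ 122 := by
  have := pv_decChar_lower s c hc h0 h1
  omega

theorem pv_decChar_isspace (s : Int) (h0 : 0 ≤ s) (h1 : s < 26) (c : Char) :
    PySem.Chars.isspace (pvDecChar s c) = PySem.Chars.isspace c := by
  by_cases h : PySem.Chars.isalpha c = true
  · rcases (pv_isalpha_iff c).mp h with hc | hc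
    · rw [pv_isspace_false _ (by have := pv_decChar_bounds_upper s c hc h0 h1; omega),
        pv_isspace_false _ (by omega)]
    · rw [pv_isspace_false _ (by have := pv_decChar_bounds_lower s c hc h0 h1; omega),
        pv_isspace_false _ (by omega)]
  · rw [pv_decChar_nonalpha s c h]

theorem pv_dec_eq_alt (s : Int) (h0 : 0 ≤ s) (h1 : s < 26) (c : Char) :
    pvDecChar s c = pvAltDecChar s c := by
  by_cases hu : 65 ≤ c.toNat ∧ c.toNat ≤ 90
  · have h1' := pv_decChar_upper s c hu h0 h1
    have hcond : ('A' ≤ c ∧ c ≤ 'Z') := by rw [pv_le_char, pv_le_char]; exact hu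
    rw [pvAltDecChar, if_pos hcond, pv_char_eq_iff, pv_mod26]
    have hm : 0 ≤ ((c.toNat : Int) - 65 - s) % 26 ∧ ((c.toNat : Int) - 65 - s) % 26 < 26 := by omega
    rw [pv_toNat_ofNat _ (by omega)]
    omega
  · by_cases hl : 97 ≤ c.toNat ∧ c.toNat ≤ 122
    · have h1' := pv_decChar_lower s c hl h0 h1
      have hcond : ¬ ('A' ≤ c ∧ c ≤ 'Z') := by
        rw [pv_le_char, pv_le_char]
        have e1 : 'A'.toNat = 65 := rfl
        have e2 : 'Z'.toNat = 90 := rfl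
        have e3 : 'a'.toNat = 97 := rfl
        have e4 : 'z'.toNat = 122 := rfl
        omega
      have hcond2 : ('a' ≤ c ∧ c ≤ 'z') := by rw [pv_le_char, pv_le_char]; exact hl
      rw [pvAltDecChar, if_neg hcond, if_pos hcond2, pv_char_eq_iff, pv_mod26]
      have hm : 0 ≤ ((c.toNat : Int) - 97 - s) % 26 ∧ ((c.toNat : Int) - 97 - s) % 26 < 26 := by omega
      rw [pv_toNat_ofNat _ (by omega)]
      omega
    · have hna : ¬ PySem.Chars.isalpha c = true := by
        rw [pv_isalpha_iff]; omega
      have e1 : 'A'.toNat = 65 := rfl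
      have e2 : 'Z'.toNat = 90 := rfl
      have e3 : 'a'.toNat = 97 := rfl
      have e4 : 'z'.toNat = 122 := rfl
      have c1 : ¬ ('A' ≤ c ∧ c ≤ 'Z') := by rw [pv_le_char, pv_le_char]; omega
      have c2 : ¬ ('a' ≤ c ∧ c ≤ 'z') := by rw [pv_le_char, pv_le_char]; omega
      rw [pv_decChar_nonalpha s c hna, pvAltDecChar, if_neg c1, if_neg c2]

theorem pv_decChar_eq_iff (s : Int) (h0 : 0 ≤ s) (h1 : s < 26) (c d : Char)
    (hc : 97 ≤ c.toNat ∧ c.toNat ≤ 122) (hd : 97 ≤ d.toNat ∧ d.toNat ≤ 122) :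
    (pvDecChar s c = d) ↔ PySem.Int.mod ((c.toNat : Int) - (d.toNat : Int)) 26 = s := by
  rw [pv_char_eq_iff, pv_mod26]
  have h1' := pv_decChar_lower s c hc h0 h1
  omega

-- a lowercase result forces a lowercase source

theorem pv_decChar_lower_source (s : Int) (h0 : 0 ≤ s) (h1 : s < 26) (c : Char)
    (h : 97 ≤ (pvDecChar s c).toNat ∧ (pvDecChar s c).toNat ≤ 122) :
    97 ≤ c.toNat ∧ c.toNat ≤ 122 := by
  by_cases hu : 65 ≤ c.toNat ∧ c.toNat ≤ 90
  · have := pv_decChar_bounds_upper s c hu h0 h1; omega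
  · by_cases hl : 97 ≤ c.toNat ∧ c.toNat ≤ 122
    · exact hl
    · rw [pv_decChar_nonalpha s c (by rw [pv_isalpha_iff]; omega)] at h; omega

theorem pv_split_go_map (f : Char → Char)
    (hf : ∀ c, PySem.Chars.isspace (f c) = PySem.Chars.isspace c) :
    ∀ (cs cur : List Char) (acc : List (List Char)),
    PySem.Chars.split₀.go (cs.map f) (cur.map f) (acc.map (List.map f)) =
      (PySem.Chars.split₀.go cs cur acc).map (List.map f) := by
  intro cs
  induction cs with
  | nil =>
    intro cur acc
    simp only [List.map_nil, PySem.Chars.split₀.go]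
    by_cases h : cur.isEmpty
    · simp [h, List.isEmpty_iff.mp h]
    · have : (cur.map f).isEmpty = false := by
        simp [List.isEmpty_eq_false_iff] at *; exact h
      simp only [this, List.isEmpty_eq_false_iff.mpr, Bool.false_eq_true, if_false,
        Bool.not_eq_true] at *
      simp [h, ← List.map_reverse]
  | cons c rest ih =>
    intro cur acc
    simp only [List.map_cons, PySem.Chars.split₀.go, hf c]
    by_cases hs : PySem.Chars.isspace c = true
    · simp only [hs, if_true]
      by_cases h : cur.isEmpty
      · have h2 : (cur.map f).isEmpty = true := by simp_all [List.isEmpty_iff]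
        simp only [h, h2, if_true]
        exact ih [] acc
      · have h2 : (cur.map f).isEmpty = false := by simp_all [List.isEmpty_eq_false_iff]
        simp only [h, h2, Bool.false_eq_true, if_false]
        have := ih [] ((cur.reverse :: acc))
        simpa [← List.map_reverse] using this
    · simp only [Bool.not_eq_true] at hs
      simp only [hs, Bool.false_eq_true, if_false]
      exact ih (c :: cur) acc

theorem pv_split_map (f : Char → Char)
    (hf : ∀ c, PySem.Chars.isspace (f c) = PySem.Chars.isspace c) (cs : List Char) :
    PySem.Chars.split₀ (cs.map f) = (PySem.Chars.split₀ cs).map (List.map f) := by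
  have := pv_split_go_map f hf cs [] []
  simpa [PySem.Chars.split₀] using this

theorem pv_all_lower (t : List Char)
    (ht : t.all (fun c => decide ('a' ≤ c) && decide (c ≤ 'z')) = true) :
    ∀ c ∈ t, 97 ≤ c.toNat ∧ c.toNat ≤ 122 := by
  intro c hc
  have h := List.all_eq_true.mp ht c hc
  simp only [Bool.and_eq_true, decide_eq_true_eq] at h
  rw [pv_le_char, pv_le_char] at h
  exact h

-- the key per-(token, word) characterisation: the token decrypts to the word at
-- exactly the shift B derives for the pair

theorem pv_match_iff (t wl : List Char)
    (htl : ∀ c ∈ t, 97 ≤ c.toNat ∧ c.toNat ≤ 122)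
    (hwl : ∀ c ∈ wl, 97 ≤ c.toNat ∧ c.toNat ≤ 122)
    (hw0 : wl ≠ [])
    (hlen : wl.length = t.length)
    (k : Nat) (hk : k < 26) :
    t.map (pvDecChar (k : Int)) = wl ↔
      ((PySem.Int.mod ((t.headI.toNat : Int) - (wl.headI.toNat : Int)) 26 = (k : Int)) ∧
        ∀ p ∈ t.zip wl, PySem.Int.mod ((p.1.toNat : Int) - (p.2.toNat : Int)) 26 = (k : Int)) := by
  have hk0 : (0 : Int) ≤ (k : Int) := by positivity
  have hk1 : (k : Int) < 26 := by exact_mod_cast hk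
  constructor
  · intro hmap
    have hpair : ∀ p ∈ t.zip wl, PySem.Int.mod ((p.1.toNat : Int) - (p.2.toNat : Int)) 26 = (k : Int) := by
      intro p hp
      obtain ⟨i, hi, hpi⟩ := List.getElem_of_mem hp
      rw [List.getElem_zip] at hpi
      have hit : i < t.length := by simp [List.length_zip] at hi; omega
      have hiw : i < wl.length := by simp [List.length_zip] at hi; omega
      have : pvDecChar (k : Int) t[i] = wl[i] := by
        have := congrArg (fun l => l[i]?) hmap
        simpa [List.getElem?_map, List.getElem?_eq_getElem, hit, hiw] using this
      rw [← hpi]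
      exact (pv_decChar_eq_iff (k : Int) hk0 hk1 t[i] wl[i]
        (htl _ (List.getElem_mem hit)) (hwl _ (List.getElem_mem hiw))).mp this
    refine ⟨?_, hpair⟩
    cases t with
    | nil => cases wl with
      | nil => exact absurd rfl hw0
      | cons a l => simp at hlen
    | cons a tr =>
      cases wl with
      | nil => exact absurd rfl hw0
      | cons b wr =>
        have : (a, b) ∈ (a :: tr).zip (b :: wr) := by simp [List.zip_cons_cons]
        simpa using hpair (a, b) this
  · rintro ⟨hhead, hall⟩
    apply List.ext_getElem
    · simp [hlen]
    · intro i h1 h2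
      have hit : i < t.length := by simpa using h1
      have hiw : i < wl.length := h2
      simp only [List.getElem_map]
      have hiz : i < (t.zip wl).length := by simp [List.length_zip]; omega
      have hp : (t[i], wl[i]) ∈ t.zip wl := by
        have h3 : (t.zip wl)[i] = (t[i], wl[i]) := List.getElem_zip (h := hiz)
        rw [← h3]
        exact List.getElem_mem hiz
      exact (pv_decChar_eq_iff (k : Int) hk0 hk1 t[i] wl[i]
        (htl _ (List.getElem_mem hit)) (hwl _ (List.getElem_mem hiw))).mpr (hall _ hp)

theorem pv_wordstep_length (t : List Char) (cnts : List Int) (w : String) :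
    (pvWordStep t cnts w).length = cnts.length := by
  simp only [pvWordStep]
  split_ifs <;> simp

theorem pv_wordstep_getD (t : List Char) (cnts : List Int) (hlen : cnts.length = 26)
    (htl : ∀ c ∈ t, 97 ≤ c.toNat ∧ c.toNat ≤ 122)
    (w : String) (hw0 : w.toList ≠ []) (hwlow : ∀ c ∈ w.toList, 97 ≤ c.toNat ∧ c.toNat ≤ 122)
    (k : Nat) (hk : k < 26) :
    (pvWordStep t cnts w).getD k 0 =
      cnts.getD k 0 + (if t.map (pvDecChar (k : Int)) = w.toList then 1 else 0) := by
  by_cases hL : w.toList.length = t.length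
  · set s0 : Int := PySem.Int.mod ((t.headI.toNat : Int) - (w.toList.headI.toNat : Int)) 26 with hs0def
    have hs0b : 0 ≤ s0 ∧ s0 < 26 := by rw [hs0def, pv_mod26]; omega
    by_cases hZ : (t.zip w.toList).all
        (fun p => PySem.Int.mod ((p.1.toNat : Int) - (p.2.toNat : Int)) 26 == s0) = true
    · have hstep : pvWordStep t cnts w = cnts.set s0.toNat (cnts.getD s0.toNat 0 + 1) := by
        unfold pvWordStep
        rw [if_pos hL, ← hs0def, if_pos hZ]
      rw [hstep]
      have hallp : ∀ p ∈ t.zip w.toList,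
          PySem.Int.mod ((p.1.toNat : Int) - (p.2.toNat : Int)) 26 = s0 := by
        intro p hp
        have := List.all_eq_true.mp hZ p hp
        simpa using this
      by_cases hkk : k = s0.toNat
      · have hmatch : t.map (pvDecChar (k : Int)) = w.toList := by
          rw [pv_match_iff t w.toList htl hwlow hw0 hL k hk]
          have hks : (k : Int) = s0 := by omega
          exact ⟨by rw [← hs0def, hks], fun p hp => by rw [hks]; exact hallp p hp⟩
        rw [if_pos hmatch, List.getD_eq_getElem?_getD, hkk, List.getElem?_set_self (by omega),
          List.getD_eq_getElem?_getD]
        simp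
      · have hnomatch : ¬ (t.map (pvDecChar (k : Int)) = w.toList) := by
          intro hmap
          have h2 := (pv_match_iff t w.toList htl hwlow hw0 hL k hk).mp hmap
          rw [← hs0def] at h2
          omega
        rw [List.getD_eq_getElem?_getD, List.getElem?_set_ne (by omega),
          ← List.getD_eq_getElem?_getD, if_neg hnomatch]
        ring
    · have hstep : pvWordStep t cnts w = cnts := by
        unfold pvWordStep
        rw [if_pos hL, ← hs0def, if_neg hZ]
      have hnomatch : ¬ (t.map (pvDecChar (k : Int)) = w.toList) := by
        intro hmap
        have h2 := (pv_match_iff t w.toList htl hwlow hw0 hL k hk).mp hmap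
        rw [← hs0def] at h2
        apply hZ
        rw [List.all_eq_true]
        intro p hp
        have h3 := h2.2 p hp
        simp only [beq_iff_eq]
        rw [h3]
        omega
      rw [hstep, if_neg hnomatch]
      ring
  · have hstep : pvWordStep t cnts w = cnts := by
      unfold pvWordStep
      rw [if_neg hL]
    have hnomatch : ¬ (t.map (pvDecChar (k : Int)) = w.toList) := by
      intro hmap
      have := congrArg List.length hmap
      simp only [List.length_map] at this
      omega
    rw [hstep, if_neg hnomatch]
    ring

theorem pv_wordfold_getD (t : List Char)
    (htl : ∀ c ∈ t, 97 ≤ c.toNat ∧ c.toNat ≤ 122) :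
    ∀ (ws : List String) (cnts : List Int), cnts.length = 26 →
    (∀ w ∈ ws, w.toList ≠ [] ∧ ∀ c ∈ w.toList, 97 ≤ c.toNat ∧ c.toNat ≤ 122) →
    ∀ (k : Nat), k < 26 →
    (ws.foldl (pvWordStep t) cnts).getD k 0 =
      cnts.getD k 0 + ((ws.countP (fun w => decide (t.map (pvDecChar (k : Int)) = w.toList))) : Int) := by
  intro ws
  induction ws with
  | nil => intro cnts hlen _ k hk; simp
  | cons w ws ih =>
    intro cnts hlen hws k hk
    obtain ⟨hw0, hwlow⟩ := hws w (List.mem_cons_self)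
    have hws' : ∀ w' ∈ ws, w'.toList ≠ [] ∧ ∀ c ∈ w'.toList, 97 ≤ c.toNat ∧ c.toNat ≤ 122 :=
      fun w' hw' => hws w' (List.mem_cons_of_mem _ hw')
    rw [List.foldl_cons, List.countP_cons,
      ih (pvWordStep t cnts w) (by rw [pv_wordstep_length]; exact hlen) hws' k hk,
      pv_wordstep_getD t cnts hlen htl w hw0 hwlow k hk]
    simp only [decide_eq_true_eq]
    split <;> push_cast <;> ring

theorem pv_wordfold_length (t : List Char) (ws : List String) (cnts : List Int) :
    (ws.foldl (pvWordStep t) cnts).length = cnts.length := by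
  induction ws generalizing cnts with
  | nil => rfl
  | cons w ws ih => rw [List.foldl_cons, ih, pv_wordstep_length]

theorem pv_countP_ind (x : List Char) : ∀ (ws : List String), ws.Nodup →
    ws.countP (fun w => decide (x = w.toList)) = if String.ofList x ∈ ws then 1 else 0 := by
  intro ws
  induction ws with
  | nil => simp
  | cons w ws ih =>
    intro hnd
    rw [List.countP_cons]
    by_cases hx : x = w.toList
    · have hofl : String.ofList x = w := by rw [hx, String.ofList_toList]
      have hzero : ws.countP (fun w => decide (x = w.toList)) = 0 := by
        rw [List.countP_eq_zero]
        intro w' hw'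
        simp only [decide_eq_true_eq]
        intro hx'
        have hww : w' = w := by rw [← String.ofList_toList (s := w'), ← hx', hofl]
        exact absurd (hww ▸ hw') (List.nodup_cons.mp hnd).1
      rw [hzero]
      simp [hx, hofl]
    · have hne : String.ofList x ≠ w := fun h => hx (by rw [← h, String.toList_ofList])
      rw [ih (List.nodup_cons.mp hnd).2]
      simp [hx, hne]

theorem pv_words_facts : ∀ w ∈ pvAltWords, w.toList ≠ [] ∧ ∀ c ∈ w.toList, 97 ≤ c.toNat ∧ c.toNat ≤ 122 := by
  intro w hw
  fin_cases hw <;> refine ⟨by decide, ?_⟩ <;> intro c hc <;> fin_cases hc <;> decide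

theorem pv_words_nodup : pvAltWords.Nodup := by decide

theorem pv_contains_iff (z : String) : pvSpanishWords.contains z = true ↔ z ∈ pvAltWords := by
  have he : (pvSpanishWords : List String) = pvAltWords := by decide
  rw [PySem.Set.contains, he]
  exact List.contains_iff_mem

theorem pv_vote_getD (cnts : List Int) (t : List Char) (hlen : cnts.length = 26)
    (k : Nat) (hk : k < 26) :
    (pvVoteToken cnts t).getD k 0 =
      cnts.getD k 0 +
        (if pvSpanishWords.contains (String.ofList (t.map (pvDecChar (k : Int)))) = true then 1 else 0) := by
  by_cases hg : t.all (fun c => decide ('a' ≤ c) && decide (c ≤ 'z')) = true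
  · rw [pvVoteToken, if_pos hg,
      pv_wordfold_getD t (pv_all_lower t hg) pvAltWords cnts hlen pv_words_facts k hk,
      pv_countP_ind _ pvAltWords pv_words_nodup]
    congr 1
    by_cases hm : String.ofList (t.map (pvDecChar (k : Int))) ∈ pvAltWords
    · rw [if_pos hm, if_pos ((pv_contains_iff _).mpr hm)]
      norm_num
    · rw [if_neg hm, if_neg (fun h => hm ((pv_contains_iff _).mp h))]
      norm_num
  · rw [pvVoteToken, if_neg hg]
    have hk0 : (0 : Int) ≤ (k : Int) := by positivity
    have hk1 : (k : Int) < 26 := by exact_mod_cast hk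
    have hnm : ¬ (pvSpanishWords.contains (String.ofList (t.map (pvDecChar (k : Int)))) = true) := by
      intro h
      have hm := (pv_contains_iff _).mp h
      obtain ⟨hne, hlow⟩ := pv_words_facts _ hm
      apply hg
      rw [List.all_eq_true]
      intro c hc
      have hmem : pvDecChar (k : Int) c ∈ (String.ofList (t.map (pvDecChar (k : Int)))).toList := by
        rw [String.toList_ofList]
        exact List.mem_map_of_mem hc
      have hbnd := hlow _ hmem
      have hsrc := pv_decChar_lower_source (k : Int) hk0 hk1 c hbnd
      simp only [Bool.and_eq_true, decide_eq_true_eq]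
      rw [pv_le_char, pv_le_char]
      exact hsrc
    rw [if_neg hnm]
    ring

theorem pv_vote_length (cnts : List Int) (t : List Char) :
    (pvVoteToken cnts t).length = cnts.length := by
  rw [pvVoteToken]
  split
  · rw [pv_wordfold_length]
  · rfl

theorem pv_tokfold_getD (tokens : List (List Char)) :
    ∀ (cnts : List Int), cnts.length = 26 → ∀ (k : Nat), k < 26 →
    (tokens.foldl (fun cs t => pvVoteToken cs t) cnts).getD k 0 =
      cnts.getD k 0 +
        ((tokens.countP (fun t =>
          pvSpanishWords.contains (String.ofList (t.map (pvDecChar (k : Int)))))) : Int) := by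
  induction tokens with
  | nil => intro cnts hlen k hk; simp
  | cons t ts ih =>
    intro cnts hlen k hk
    rw [List.foldl_cons, List.countP_cons,
      ih (pvVoteToken cnts t) (by rw [pv_vote_length]; exact hlen) k hk,
      pv_vote_getD cnts t hlen k hk]
    split <;> push_cast <;> ring

theorem pv_tokfold_length (tokens : List (List Char)) (cnts : List Int) :
    (tokens.foldl (fun cs t => pvVoteToken cs t) cnts).length = cnts.length := by
  induction tokens generalizing cnts with
  | nil => rfl
  | cons t ts ih => rw [List.foldl_cons, ih, pv_vote_length]

theorem pv_foldl_max_mem (xs : List Int) : ∀ (b : Int), xs.foldl max b = b ∨ xs.foldl max b ∈ xs := by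
  induction xs with
  | nil => intro b; left; rfl
  | cons x xs ih =>
    intro b
    rw [List.foldl_cons]
    rcases ih (max b x) with h | h
    · rcases max_cases b x with ⟨he, _⟩ | ⟨he, _⟩
      · left; rw [h, he]
      · right; rw [h, he]; exact List.mem_cons_self
    · right; exact List.mem_cons_of_mem _ h

theorem pv_argmax_fold (sc : Int → Int) (dec : Int → String) :
    ∀ (l : List Int) (d0 : String) (b0 : Int),
    l.foldl (fun st s => if st.2 < sc s then (dec s, sc s) else st) (d0, b0) =
      (if (l.map sc).foldl max b0 ≤ b0 then (d0, b0)
       else (dec (l.getD ((PySem.List.index? (l.map sc) ((l.map sc).foldl max b0)).getD 0) 0),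
             (l.map sc).foldl max b0)) := by
  intro l
  induction l with
  | nil => intro d0 b0; simp
  | cons a l ih =>
    intro d0 b0
    rw [List.foldl_cons, List.map_cons, List.foldl_cons]
    by_cases h1 : sc a ≤ b0
    · have hstep : (if (d0, b0).2 < sc a then (dec a, sc a) else (d0, b0)) = (d0, b0) := by
        rw [if_neg (by simp; omega)]
      rw [hstep, ih d0 b0]
      have hmax : max b0 (sc a) = b0 := by omega
      rw [hmax]
      by_cases h2 : (l.map sc).foldl max b0 ≤ b0
      · rw [if_pos h2, if_pos h2]
      · rw [if_neg h2, if_neg h2]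
      
        have hne : sc a ≠ (l.map sc).foldl max b0 := by omega
        rw [PySem.List.index?_cons_of_ne _ hne]
        rcases pv_foldl_max_mem (l.map sc) b0 with h | h
        · omega
        · obtain ⟨k, hk⟩ := (PySem.List.index?_isSome_iff _ _).mpr h |> Option.isSome_iff_exists.mp
          rw [hk]
          simp only [Option.map_some, Option.getD_some]
          rfl
    · have hstep : (if (d0, b0).2 < sc a then (dec a, sc a) else (d0, b0)) = (dec a, sc a) := by
        rw [if_pos (by simp; omega)]
      rw [hstep, ih (dec a) (sc a)]
      have hmax : max b0 (sc a) = sc a := by omega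
      rw [hmax]
      have hle := (PySem.List.le_foldl_max (l.map sc) (sc a)).1
      by_cases h2 : (l.map sc).foldl max (sc a) ≤ sc a
      · have hm : (l.map sc).foldl max (sc a) = sc a := by omega
        rw [if_pos h2, if_neg (by omega), hm, PySem.List.index?_cons_self]
        simp only [Option.getD_some]
        rfl
      · rw [if_neg h2, if_neg (by omega)]
        have hne : sc a ≠ (l.map sc).foldl max (sc a) := by omega
        rw [PySem.List.index?_cons_of_ne _ hne]
        rcases pv_foldl_max_mem (l.map sc) (sc a) with h | h
        · omega
        · obtain ⟨k, hk⟩ := (PySem.List.index?_isSome_iff _ _).mpr h |> Option.isSome_iff_exists.mp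
          rw [hk]
          simp only [Option.map_some, Option.getD_some]
          rfl

theorem pv_foldl_append (f : Char → Char) (l : List Char) (acc : List Char) :
    l.foldl (fun a c => a ++ [f c]) acc = acc ++ l.map f := by
  induction l generalizing acc with
  | nil => simp
  | cons c l ih => simp [ih]

theorem pv_caesar_eq_map (text : String) (s : Int) :
    caesar_decrypt text s = String.ofList (text.toList.map (pvDecChar s)) := by
  unfold caesar_decrypt
  rw [pv_foldl_append]
  rfl

-- the score A computes at one shift

def pvScA (text : String) (s : Int) : Int :=
  (PySem.Str.split₀ (caesar_decrypt text s)).foldl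
    (fun n w => if pvSpanishWords.contains w then n + 1 else n) 0

theorem pv_count_foldl (ws : List String) : ∀ (n : Int),
    ws.foldl (fun n w => if pvSpanishWords.contains w then n + 1 else n) n =
      n + (ws.countP (fun w => pvSpanishWords.contains w) : Nat) := by
  induction ws with
  | nil => intro n; simp
  | cons w ws ih =>
    intro n
    rw [List.foldl_cons, List.countP_cons, ih]
    by_cases h : pvSpanishWords.contains w = true
    · rw [if_pos h, if_pos h]; push_cast; ring
    · rw [if_neg h, if_neg h]; push_cast; ring

theorem pv_scA_eq (text : String) (k : Nat) (hk : k < 26) :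
    pvScA text (k : Int) =
      ((PySem.Chars.split₀ text.toList).countP (fun t =>
        pvSpanishWords.contains (String.ofList (t.map (pvDecChar (k : Int))))) : Nat) := by
  have hk0 : (0 : Int) ≤ (k : Int) := by positivity
  have hk1 : (k : Int) < 26 := by exact_mod_cast hk
  unfold pvScA
  rw [pv_caesar_eq_map, PySem.Str.split₀, String.toList_ofList,
    pv_split_map _ (pv_decChar_isspace _ hk0 hk1), pv_count_foldl]
  rw [List.map_map, List.countP_map]
  simp [Function.comp_def]

theorem pv_main (text : String) : find_best_decryption text = find_best_decryption_alt text := by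
  -- B's counts table
  have hBfold : (PySem.Str.split₀ text).foldl (fun cs w => pvVoteToken cs w.toList) (List.replicate 26 0) =
      (PySem.Chars.split₀ text.toList).foldl (fun cs t => pvVoteToken cs t) (List.replicate 26 0) := by
    rw [PySem.Str.split₀, List.foldl_map]
    simp only [String.toList_ofList]
  set counts : List Int :=
    (PySem.Chars.split₀ text.toList).foldl (fun cs t => pvVoteToken cs t) (List.replicate 26 0) with hcounts
  have hclen : counts.length = 26 := by rw [hcounts, pv_tokfold_length]; simp
  have hcget : ∀ (k : Nat), k < 26 → counts.getD k 0 =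
      ((PySem.Chars.split₀ text.toList).countP (fun t =>
        pvSpanishWords.contains (String.ofList (t.map (pvDecChar (k : Int))))) : Nat) := by
    intro k hk
    have hrep : (List.replicate 26 (0 : Int)).getD k 0 = 0 := by
      rw [List.getD_eq_getElem?_getD, List.getElem?_replicate]
      simp [hk]
    rw [hcounts, pv_tokfold_getD _ _ (by simp) k hk, hrep, zero_add]
  have hcget' : ∀ (k : Nat), k < 26 → counts.getD k 0 = pvScA text (k : Int) := by
    intro k hk
    rw [hcget k hk, pv_scA_eq text k hk]
  have hnonneg : ∀ (k : Nat), k < 26 → 0 ≤ counts.getD k 0 := by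
    intro k hk; rw [hcget k hk]; positivity
  -- the range list and its map under A's score
  have hLget : ∀ (k : Nat), k < 26 → (PySem.List.pyRange 0 26 1).getD k 0 = (k : Int) := by decide
  have hLlen : (PySem.List.pyRange 0 26 1).length = 26 := by decide
  have hmap : (PySem.List.pyRange 0 26 1).map (pvScA text) = counts := by
    apply List.ext_getElem
    · rw [List.length_map, hLlen, hclen]
    · intro i h1 h2
      have hi : i < 26 := by rw [List.length_map, hLlen] at h1; exact h1
      have hLsome : ∀ j, j < 26 → (PySem.List.pyRange 0 26 1)[j]? = some ((j : Nat) : Int) := by decide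
      have hd : (List.map (pvScA text) (PySem.List.pyRange 0 26 1)).getD i 0 = counts.getD i 0 := by
        rw [List.getD_eq_getElem?_getD, List.getElem?_map, hLsome i hi]
        simp only [Option.map_some, Option.getD_some]
        rw [← hcget' i hi]
      rw [List.getD_eq_getElem?_getD, List.getD_eq_getElem?_getD,
        List.getElem?_eq_getElem h1, List.getElem?_eq_getElem h2] at hd
      simpa using hd
  -- A's fold, characterised
  have harg := pv_argmax_fold (pvScA text) (caesar_decrypt text) (PySem.List.pyRange 0 26 1) "" 0
  have hA : find_best_decryption text =
      (if ((PySem.List.pyRange 0 26 1).map (pvScA text)).foldl max 0 ≤ 0 then (("" : String), (0 : Int))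
       else (caesar_decrypt text ((PySem.List.pyRange 0 26 1).getD
               ((PySem.List.index? ((PySem.List.pyRange 0 26 1).map (pvScA text))
                 (((PySem.List.pyRange 0 26 1).map (pvScA text)).foldl max 0)).getD 0) 0),
             ((PySem.List.pyRange 0 26 1).map (pvScA text)).foldl max 0)).1 := by
    show ((PySem.List.pyRange 0 26 1).foldl (fun (st : String × Int) s =>
        if st.2 < pvScA text s then (caesar_decrypt text s, pvScA text s) else st) ("", 0)).1 = _
    rw [harg]
  rw [hA, hmap]
  -- B's max over counts
  obtain ⟨c0, rest, hcr⟩ : ∃ c0 rest, counts = c0 :: rest := by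
    cases hc : counts with
    | nil => rw [hc] at hclen; simp at hclen
    | cons a l => exact ⟨a, l, rfl⟩
  have hc0 : 0 ≤ c0 := by
    have := hnonneg 0 (by omega)
    rw [hcr] at this
    simpa using this
  have hbest : (PySem.List.max? counts (fun x => x)).getD 0 = counts.foldl max 0 := by
    rw [hcr, PySem.List.max?_id_cons]
    simp only [Option.getD_some, List.foldl_cons]
    rw [show max (0 : Int) c0 = c0 by omega]
  have hm := (PySem.List.le_foldl_max ((c0 :: rest).map (fun x => x)) 0).1
  have hB : find_best_decryption_alt text =
      (if (PySem.List.max? counts (fun x => x)).getD 0 = 0 then ""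
       else pvAltDecrypt text
         (((PySem.List.index? counts ((PySem.List.max? counts (fun x => x)).getD 0)).getD 0 : Nat) : Int)) := by
    unfold find_best_decryption_alt
    rw [hBfold]
  rw [hB, hbest]
  by_cases hz : counts.foldl max 0 ≤ 0
  · have : counts.foldl max 0 = 0 := by
      rcases pv_foldl_max_mem counts 0 with h | h
      · rw [h]
      · obtain ⟨i, hi, hie⟩ := List.getElem_of_mem h
        have := hnonneg i (by omega)
        rw [List.getD_eq_getElem?_getD, List.getElem?_eq_getElem hi] at this
        simp at this
        omega
    rw [if_pos hz, if_pos (by rw [this])]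
  · have hmz : ¬ counts.foldl max 0 = 0 := by
      rcases pv_foldl_max_mem counts 0 with h | h
      · omega
      · omega
    rw [if_neg hz, if_neg hmz]
    -- the selected index
    have hmem : counts.foldl max 0 ∈ counts := by
      rcases pv_foldl_max_mem counts 0 with h | h
      · omega
      · exact h
    obtain ⟨k, hk⟩ := (PySem.List.index?_isSome_iff counts (counts.foldl max 0)).mpr hmem
      |> Option.isSome_iff_exists.mp
    obtain ⟨hklt, _, _⟩ := PySem.List.getElem_of_index?_eq_some hk
    rw [hk]
    simp only [Option.getD_some]
    have hk26 : k < 26 := by omega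
    rw [hLget k hk26]
    -- final decryption equality at shift k
    rw [pv_caesar_eq_map]
    unfold pvAltDecrypt
    congr 1
    apply List.map_congr_left
    intro c _
    exact pv_dec_eq_alt (k : Int) (by positivity) (by exact_mod_cast hk26) c


-- ===== VERDICT (by name: the statement is the Claim_ definition above) =====
theorem find_best_decryption_spec : Claim_equal_find_best_decryption := by
  intro encrypted_text _
  unfold Spec_find_best_decryption
  exact pv_main encrypted_text
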